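-- pv_equiv track=rewrite | github.com/cabinrentalsofgeorgia-bit/Fortress-Prime | fortress-guest-platform/tools/extract_historical_leads.py | _extract_staff_response
-- ===== SOURCE A (Python) =====
-- def _extract_staff_response(notes: list) -> str | None:
--     """
--     Pull the best staff response from notes — prefer the longest
--     note that isn't just a system-generated status change.
--     """
--     candidates = []
--     for n in notes:
--         msg = (n.get("message") or "").strip()
--         if len(msg) > 10:
--             candidates.append(msg)
--     if not candidates:
--         return None
--     return max(candidates, key=len)
-- ===== SOURCE B (Python) =====
-- def _extract_staff_response(notes: list) -> str | None:
--     """Single pass keeping a running best instead of building a list and calling max."""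
--     best = None
--     best_len = -1
--     for n in notes:
--         msg = (n.get("message") or "").strip()
--         L = len(msg)
--         if L > 10 and L > best_len:
--             best = msg
--             best_len = L
--     return best
-- ===== Notes on version B (the rewrite author's own statement) =====
-- stated objective: simpler
-- what changed: Replaces build-candidate-list-then-max(key=len) with a single pass that keeps a running best message and its length, using strict > so the first of equally-long messages wins like max does.
import Mathlib
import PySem

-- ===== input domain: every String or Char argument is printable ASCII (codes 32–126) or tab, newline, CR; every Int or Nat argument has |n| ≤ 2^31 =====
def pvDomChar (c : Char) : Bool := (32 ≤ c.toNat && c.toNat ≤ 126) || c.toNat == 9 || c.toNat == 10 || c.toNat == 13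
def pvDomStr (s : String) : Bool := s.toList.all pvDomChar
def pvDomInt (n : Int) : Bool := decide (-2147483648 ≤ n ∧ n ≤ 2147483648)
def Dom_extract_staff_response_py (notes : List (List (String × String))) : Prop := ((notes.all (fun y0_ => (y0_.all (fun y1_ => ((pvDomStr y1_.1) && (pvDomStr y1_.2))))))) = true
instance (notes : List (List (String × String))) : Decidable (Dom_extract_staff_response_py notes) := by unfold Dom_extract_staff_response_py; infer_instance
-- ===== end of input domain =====

-- B keeps a running best in one pass instead of building a candidate list and taking max(key=len); same result, O(1) extra space.

-- n.get("message") or "" : first-match lookup in the association list, "" when absent (and "" stays "")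
def pvMsgOf (n : List (String × String)) : String :=
  PySem.Str.strip (((n.find? (fun p => p.1 == "message")).map Prod.snd).getD "")

-- ===== PORT A =====
def extract_staff_response_py (notes : List (List (String × String))) : Option String :=
  let candidates := notes.foldl (fun acc n =>
    let msg := pvMsgOf n
    if PySem.Str.len msg > 10 then acc ++ [msg] else acc) []
  if candidates = [] then none
  else PySem.List.max? candidates PySem.Str.len

-- ===== PORT B =====
def extract_staff_response_py_alt (notes : List (List (String × String))) : Option String :=
  (notes.foldl (fun st n =>
      let msg := pvMsgOf n
      let L := PySem.Str.len msg
      if L > 10 ∧ L > st.2 then (some msg, L) else st)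
    ((none : Option String), (-1 : Int))).1

-- ===== PRECONDITION & SPEC =====
def Spec_extract_staff_response_py (notes : List (List (String × String))) (out : Option String) : Prop := out = extract_staff_response_py_alt notes
instance (notes : List (List (String × String))) (out : Option String) : Decidable (Spec_extract_staff_response_py notes out) := by unfold Spec_extract_staff_response_py; infer_instance

-- ===== CLAIM (what is proved, stated in full; the proofs are below) =====
def Claim_equal_extract_staff_response_py : Prop := ∀ (notes : List (List (String × String))), Dom_extract_staff_response_py notes → Spec_extract_staff_response_py notes (extract_staff_response_py notes)

-- ===== LEMMAS AND PROOFS =====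

-- the step of max?(·, key=len): keep the first of equally-long messages
def pvStepMax (acc : Option String) (x : String) : Option String :=
  match acc with
  | none => some x
  | some m => if PySem.Str.len m < PySem.Str.len x then some x else some m

def pvCand (notes : List (List (String × String))) : List String :=
  (notes.map pvMsgOf).filter (fun m => 10 < PySem.Str.len m)

lemma pvStepMax_some (m x : String) :
    pvStepMax (some m) x = if PySem.Str.len m < PySem.Str.len x then some x else some m := rfl

lemma pvCand_cons_pos (n : List (String × String)) (t : List (List (String × String)))
    (h : 10 < PySem.Str.len (pvMsgOf n)) :
    pvCand (n :: t) = pvMsgOf n :: pvCand t := by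
  unfold pvCand
  rw [List.map_cons, List.filter_cons]
  have hd : decide (10 < PySem.Str.len (pvMsgOf n)) = true := decide_eq_true h
  simp only [hd, if_true]

lemma pvCand_cons_neg (n : List (String × String)) (t : List (List (String × String)))
    (h : ¬ 10 < PySem.Str.len (pvMsgOf n)) :
    pvCand (n :: t) = pvCand t := by
  unfold pvCand
  rw [List.map_cons, List.filter_cons]
  have hd : decide (10 < PySem.Str.len (pvMsgOf n)) = false := decide_eq_false h
  simp only [hd, Bool.false_eq_true, if_false]

lemma candA (notes : List (List (String × String))) :
    ∀ acc : List String,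
      notes.foldl (fun acc n =>
        let msg := pvMsgOf n
        if PySem.Str.len msg > 10 then acc ++ [msg] else acc) acc
      = acc ++ pvCand notes := by
  induction notes with
  | nil => intro acc; simp [pvCand]
  | cons n t ih =>
    intro acc
    rw [List.foldl_cons]
    show List.foldl _ (if PySem.Str.len (pvMsgOf n) > 10 then acc ++ [pvMsgOf n] else acc) t = _
    by_cases h : PySem.Str.len (pvMsgOf n) > 10
    · rw [if_pos h, ih, pvCand_cons_pos n t h, List.append_assoc]
      rfl
    · rw [if_neg h, ih, pvCand_cons_neg n t h]

lemma A_normal (notes : List (List (String × String))) :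
    extract_staff_response_py notes = (pvCand notes).foldl pvStepMax none := by
  unfold extract_staff_response_py
  rw [candA notes []]
  simp only [List.nil_append]
  by_cases h : pvCand notes = []
  · rw [if_pos h, h, List.foldl_nil]
  · rw [if_neg h, PySem.List.max?]
    exact List.foldl_ext _ _ none (fun a x _ => by cases a <;> rfl)

lemma B_loop (notes : List (List (String × String))) :
    ∀ (b : Option String) (bl : Int),
      ((b = none ∧ bl = -1) ∨ (∃ m, b = some m ∧ bl = PySem.Str.len m)) →
      (notes.foldl (fun st n =>
          let msg := pvMsgOf n
          let L := PySem.Str.len msg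
          if L > 10 ∧ L > st.2 then (some msg, L) else st) (b, bl)).1
      = (pvCand notes).foldl pvStepMax b := by
  induction notes with
  | nil => intro b bl _; rfl
  | cons n t ih =>
    intro b bl hrel
    rw [List.foldl_cons]
    show (List.foldl _
        (if PySem.Str.len (pvMsgOf n) > 10 ∧ PySem.Str.len (pvMsgOf n) > bl
         then (some (pvMsgOf n), PySem.Str.len (pvMsgOf n)) else (b, bl)) t).1 = _
    by_cases h10 : 10 < PySem.Str.len (pvMsgOf n)
    · rw [pvCand_cons_pos n t h10, List.foldl_cons]
      rcases hrel with ⟨hb, hbl⟩ | ⟨m, hb, hbl⟩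
      · subst hb; subst hbl
        rw [if_pos ⟨h10, by omega⟩, ih _ _ (Or.inr ⟨pvMsgOf n, rfl, rfl⟩)]
        rfl
      · subst hb; subst hbl
        by_cases hc : PySem.Str.len m < PySem.Str.len (pvMsgOf n)
        · rw [if_pos ⟨h10, hc⟩, ih _ _ (Or.inr ⟨pvMsgOf n, rfl, rfl⟩)]
          show _ = List.foldl pvStepMax (pvStepMax (some m) (pvMsgOf n)) (pvCand t)
          rw [show pvStepMax (some m) (pvMsgOf n) = some (pvMsgOf n) by
            rw [pvStepMax_some, if_pos hc]]
        · rw [if_neg (fun h => hc h.2), ih _ _ (Or.inr ⟨m, rfl, rfl⟩)]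
          show _ = List.foldl pvStepMax (pvStepMax (some m) (pvMsgOf n)) (pvCand t)
          rw [show pvStepMax (some m) (pvMsgOf n) = some m by
            rw [pvStepMax_some, if_neg hc]]
    · rw [pvCand_cons_neg n t h10, if_neg (fun h => h10 h.1)]
      exact ih _ _ hrel

-- ===== VERDICT (by name: the statement is the Claim_ definition above) =====
theorem extract_staff_response_py_spec : Claim_equal_extract_staff_response_py := by
  intro notes _
  unfold Spec_extract_staff_response_py
  rw [A_normal]
  unfold extract_staff_response_py_alt
  rw [B_loop notes none (-1) (Or.inl ⟨rfl, rfl⟩)]
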